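-- pv_equiv track=rewrite | github.com/DoobHub/ListOverlaps | ListOverlap.py | fuselst
-- ===== SOURCE A (Python) =====
-- def fuselst(lsta,lstb):
--     fuselst_og = [i for i in lstb if i in lsta]
--     fuselst = []
--     for x in fuselst_og:
--         if x not in fuselst:
--             fuselst.append(x)
--     fuselst.sort(reverse=False)
--     return fuselst
-- ===== SOURCE B (Python) =====
-- def fuselst(lsta, lstb):
--     a = sorted(lsta)
--     b = sorted(lstb)
--     out = []
--     i = j = 0
--     while i < len(a) and j < len(b):
--         if a[i] < b[j]:
--             i += 1
--         elif b[j] < a[i]: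
--             j += 1
--         else:
--             if not out or out[-1] != a[i]:
--                 out.append(a[i])
--             i += 1
--             j += 1
--     return out
-- ===== Notes on version B (the rewrite author's own statement) =====
-- stated objective: faster
-- what changed: Sorts both lists first and finds the deduplicated intersection with a single two-pointer merge scan (dedup against the last emitted element), instead of an O(n*m) membership filter, an O(k^2) list dedup and a final sort.
import Mathlib
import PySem

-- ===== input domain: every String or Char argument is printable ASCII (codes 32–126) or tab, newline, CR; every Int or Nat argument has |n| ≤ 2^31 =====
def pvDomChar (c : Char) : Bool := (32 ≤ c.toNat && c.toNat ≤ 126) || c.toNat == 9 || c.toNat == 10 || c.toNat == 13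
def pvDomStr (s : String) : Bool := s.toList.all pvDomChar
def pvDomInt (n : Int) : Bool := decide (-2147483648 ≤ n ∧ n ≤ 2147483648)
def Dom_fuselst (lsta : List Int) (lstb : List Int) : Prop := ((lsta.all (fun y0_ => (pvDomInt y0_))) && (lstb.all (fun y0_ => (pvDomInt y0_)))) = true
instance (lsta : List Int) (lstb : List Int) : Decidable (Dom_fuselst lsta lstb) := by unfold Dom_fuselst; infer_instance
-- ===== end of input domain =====

-- B sorts both lists and extracts the deduplicated intersection with one two-pointer merge scan,
-- replacing A's quadratic membership filter + quadratic list dedup + final sort (objective: faster).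
-- ===== PORT A =====
def fuselst (lsta : List Int) (lstb : List Int) : List Int :=
  -- fuselst_og = [i for i in lstb if i in lsta]
  let fuselst_og := lstb.filter (fun i => lsta.contains i)
  -- for x in fuselst_og: if x not in fuselst: fuselst.append(x)
  let fused := fuselst_og.foldl (fun acc x => if acc.contains x then acc else acc ++ [x]) []
  -- fuselst.sort(reverse=False)
  PySem.List.sorted fused (fun x => x) false

-- ===== PORT B =====
-- the while loop of Source B: the two pointers i, j become the two remaining suffixes; out is the same list
def fuselstGo : List Int → List Int → List Int → List Int
  | x :: xs, y :: ys, out =>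
    if x < y then fuselstGo xs (y :: ys) out
    else if y < x then fuselstGo (x :: xs) ys out
    else if out.getLast? ≠ some x then fuselstGo xs ys (out ++ [x])   -- 'not out or out[-1] != a[i]'
    else fuselstGo xs ys out
  | _, _, out => out

def fuselst_alt (lsta : List Int) (lstb : List Int) : List Int :=
  let a := PySem.List.sorted lsta (fun x => x) false
  let b := PySem.List.sorted lstb (fun x => x) false
  fuselstGo a b []

-- ===== PRECONDITION & SPEC =====
def Spec_fuselst (lsta : List Int) (lstb : List Int) (out : List Int) : Prop := out = fuselst_alt lsta lstb
instance (lsta : List Int) (lstb : List Int) (out : List Int) : Decidable (Spec_fuselst lsta lstb out) := by unfold Spec_fuselst; infer_instance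

-- ===== CLAIM (what is proved, stated in full; the proofs are below) =====
def Claim_equal_fuselst : Prop := ∀ (lsta : List Int) (lstb : List Int), Dom_fuselst lsta lstb → Spec_fuselst lsta lstb (fuselst lsta lstb)

-- ===== LEMMAS AND PROOFS =====

-- accumulator-free form of the merge loop: prev is the last emitted element
def sinter : List Int → List Int → Option Int → List Int
  | x :: xs, y :: ys, prev =>
    if x < y then sinter xs (y :: ys) prev
    else if y < x then sinter (x :: xs) ys prev
    else if prev ≠ some x then x :: sinter xs ys (some x)
    else sinter xs ys prev
  | _, _, _ => []

theorem fuselstGo_eq_sinter (a b : List Int) (prev : Option Int) :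
    ∀ out : List Int, out.getLast? = prev → fuselstGo a b out = out ++ sinter a b prev := by
  fun_induction sinter a b prev with
  | case1 x xs y ys prev hlt ih =>
      intro out hout
      rw [fuselstGo, if_pos hlt, ih out hout]
  | case2 x xs y ys prev hlt hgt ih =>
      intro out hout
      rw [fuselstGo, if_neg hlt, if_pos hgt, ih out hout]
  | case3 x xs y ys prev hlt hgt hne ih =>
      intro out hout
      rw [fuselstGo, if_neg hlt, if_neg hgt, if_pos (hout ▸ hne),
        ih (out ++ [x]) (by simp), List.append_assoc]
      rfl
  | case4 x xs y ys prev hlt hgt hne ih =>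
      intro out hout
      rw [fuselstGo, if_neg hlt, if_neg hgt, if_neg (hout ▸ hne), ih out hout]
  | case5 a b prev h =>
      intro out hout
      match a, b with
      | [], _ => simp [fuselstGo]
      | _ :: _, [] => simp [fuselstGo]
      | x :: xs, y :: ys => exact absurd rfl (h x xs y ys rfl)

theorem sinter_main (a b : List Int) (prev : Option Int)
    (ha : a.Pairwise (· ≤ ·)) (hb : b.Pairwise (· ≤ ·))
    (hp : ∀ p, prev = some p → (∀ z ∈ a, p ≤ z) ∧ (∀ z ∈ b, p ≤ z)) :
    (∀ z, z ∈ sinter a b prev ↔ z ∈ a ∧ z ∈ b ∧ prev ≠ some z) ∧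
      (sinter a b prev).Pairwise (· < ·) := by
  fun_induction sinter a b prev with
  | case1 x xs y ys prev hlt ih =>
      rw [List.pairwise_cons] at ha
      have ih' := ih ha.2 hb
        (fun p hpp => ⟨fun z hz => (hp p hpp).1 z (List.mem_cons_of_mem _ hz), (hp p hpp).2⟩)
      refine ⟨fun z => ?_, ih'.2⟩
      rw [ih'.1 z]
      constructor
      · rintro ⟨h1, h2, h3⟩; exact ⟨List.mem_cons_of_mem _ h1, h2, h3⟩
      · rintro ⟨h1, h2, h3⟩
        rcases List.mem_cons.1 h1 with rfl | h1
        · rcases List.mem_cons.1 h2 with rfl | h2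
          · omega
          · rw [List.pairwise_cons] at hb
            have := hb.1 z h2; omega
        · exact ⟨h1, h2, h3⟩
  | case2 x xs y ys prev hlt hgt ih =>
      rw [List.pairwise_cons] at hb
      have ih' := ih ha hb.2
        (fun p hpp => ⟨(hp p hpp).1, fun z hz => (hp p hpp).2 z (List.mem_cons_of_mem _ hz)⟩)
      refine ⟨fun z => ?_, ih'.2⟩
      rw [ih'.1 z]
      constructor
      · rintro ⟨h1, h2, h3⟩; exact ⟨h1, List.mem_cons_of_mem _ h2, h3⟩
      · rintro ⟨h1, h2, h3⟩
        rcases List.mem_cons.1 h2 with rfl | h2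
        · rcases List.mem_cons.1 h1 with rfl | h1
          · omega
          · rw [List.pairwise_cons] at ha
            have := ha.1 z h1; omega
        · exact ⟨h1, h2, h3⟩
  | case3 x xs y ys prev hlt hgt hne ih =>
      obtain rfl : x = y := by omega
      rw [List.pairwise_cons] at ha hb
      have hxs : ∀ z ∈ xs, x ≤ z := ha.1
      have hys : ∀ z ∈ ys, x ≤ z := hb.1
      have ih' := ih ha.2 hb.2
        (fun p hpp => by cases Option.some.inj hpp; exact ⟨hxs, hys⟩)
      constructor
      · intro z
        constructor
        · intro h
          rcases List.mem_cons.1 h with rfl | h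
          · exact ⟨List.mem_cons_self, List.mem_cons_self, hne⟩
          · obtain ⟨h1, h2, h3⟩ := (ih'.1 z).1 h
            refine ⟨List.mem_cons_of_mem _ h1, List.mem_cons_of_mem _ h2, ?_⟩
            intro hpz
            have hpx := (hp z hpz).1 x List.mem_cons_self
            have hxz := hxs z h1
            have hzx : z ≠ x := fun e => h3 (by rw [e])
            omega
        · rintro ⟨h1, h2, h3⟩
          by_cases hz : z = x
          · subst hz; exact List.mem_cons_self
          · rcases List.mem_cons.1 h1 with rfl | h1
            · exact absurd rfl hz
            rcases List.mem_cons.1 h2 with rfl | h2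
            · exact absurd rfl hz
            exact List.mem_cons_of_mem _
              ((ih'.1 z).2 ⟨h1, h2, fun e => hz (Option.some.inj e).symm⟩)
      · rw [List.pairwise_cons]
        refine ⟨fun z hz => ?_, ih'.2⟩
        obtain ⟨h1, h2, h3⟩ := (ih'.1 z).1 hz
        have := hxs z h1
        have hzx : z ≠ x := fun e => h3 (by rw [e])
        omega
  | case4 x xs y ys prev hlt hgt hne ih =>
      obtain rfl : x = y := by omega
      have hprev : prev = some x := not_not.1 hne
      rw [List.pairwise_cons] at ha hb
      have hxs : ∀ z ∈ xs, x ≤ z := ha.1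
      have hys : ∀ z ∈ ys, x ≤ z := hb.1
      have ih' := ih ha.2 hb.2
        (fun p hpp => by rw [hprev] at hpp; cases Option.some.inj hpp; exact ⟨hxs, hys⟩)
      refine ⟨fun z => ?_, ih'.2⟩
      rw [ih'.1 z]
      constructor
      · rintro ⟨h1, h2, h3⟩
        exact ⟨List.mem_cons_of_mem _ h1, List.mem_cons_of_mem _ h2, h3⟩
      · rintro ⟨h1, h2, h3⟩
        have hzx : z ≠ x := fun e => h3 (by rw [hprev, e])
        rcases List.mem_cons.1 h1 with rfl | h1
        · exact absurd rfl hzx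
        rcases List.mem_cons.1 h2 with rfl | h2
        · exact absurd rfl hzx
        exact ⟨h1, h2, h3⟩
  | case5 a b prev h =>
      refine ⟨fun z => ?_, ?_⟩
      · match a, b with
        | [], b => simp
        | x :: xs, [] => simp
        | x :: xs, y :: ys => exact absurd rfl (h x xs y ys rfl)
      · match a, b with
        | [], b => simp
        | x :: xs, [] => simp
        | x :: xs, y :: ys => exact absurd rfl (h x xs y ys rfl)

-- A's dedup loop is literally PySem.Set.ofList of the filtered list.
theorem fuselst_dedup_eq_ofList (og : List Int) :
    og.foldl (fun acc x => if acc.contains x then acc else acc ++ [x]) []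
      = PySem.Set.ofList og := rfl

-- ===== VERDICT (by name: the statement is the Claim_ definition above) =====
theorem fuselst_spec : Claim_equal_fuselst := by
  intro lsta lstb _
  show fuselst lsta lstb = fuselst_alt lsta lstb
  unfold fuselst fuselst_alt
  simp only []
  rw [fuselst_dedup_eq_ofList]
  rw [fuselstGo_eq_sinter _ _ none [] rfl, List.nil_append]
  have hm := sinter_main (PySem.List.sorted lsta (fun x => x) false)
      (PySem.List.sorted lstb (fun x => x) false) none
      (PySem.List.sorted_pairwise ..) (PySem.List.sorted_pairwise ..)
      (fun p hpp => by cases hpp)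
  have hnd : (sinter (PySem.List.sorted lsta (fun x => x) false)
      (PySem.List.sorted lstb (fun x => x) false) none).Nodup :=
    hm.2.imp (fun h => ne_of_lt h)
  have hperm : (sinter (PySem.List.sorted lsta (fun x => x) false)
      (PySem.List.sorted lstb (fun x => x) false) none).Perm
      (PySem.Set.ofList (lstb.filter (fun i => lsta.contains i))) := by
    rw [List.perm_ext_iff_of_nodup hnd (PySem.Set.nodup_ofList _)]
    intro z
    rw [hm.1 z]
    simp [PySem.Set.mem_ofList, List.mem_filter, PySem.List.mem_sorted, and_comm]
  exact PySem.List.sorted_eq_of_perm_of_pairwise_lt _ _ _ hperm hm.2
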